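-- pv_equiv track=rewrite | github.com/ai4db-storage/WorthyPar | WorthyPar/Query.py | find_operator
-- ===== SOURCE A (Python) =====
-- def find_operator(str, start_index):
--     index_list = []
--     operators = ['+', '-', '*', '/']
--     for operator in operators:
--         index = str.find(operator, start_index)
--         if index != -1:
--             index_list.append(index)
--     if not index_list:
--         return -1
--     else:
--         return min(index_list)
-- ===== SOURCE B (Python) =====
-- OPERATORS = "+-*/"
--
-- def find_operator(str, start_index):
--     n = len(str)
--     k = start_index
--     if k < 0:
--         k = n + k
--         if k < 0:
--             k = 0
--     for i in range(k, n):
--         if str[i] in OPERATORS: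
--             return i
--     return -1
-- ===== Notes on version B (the rewrite author's own statement) =====
-- stated objective: simpler
-- what changed: Replaced four separate str.find calls plus collecting and taking min of their results by one left-to-right scan from the effective start index that returns the first position holding any of '+', '-', '*', '/'.
import Mathlib
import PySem

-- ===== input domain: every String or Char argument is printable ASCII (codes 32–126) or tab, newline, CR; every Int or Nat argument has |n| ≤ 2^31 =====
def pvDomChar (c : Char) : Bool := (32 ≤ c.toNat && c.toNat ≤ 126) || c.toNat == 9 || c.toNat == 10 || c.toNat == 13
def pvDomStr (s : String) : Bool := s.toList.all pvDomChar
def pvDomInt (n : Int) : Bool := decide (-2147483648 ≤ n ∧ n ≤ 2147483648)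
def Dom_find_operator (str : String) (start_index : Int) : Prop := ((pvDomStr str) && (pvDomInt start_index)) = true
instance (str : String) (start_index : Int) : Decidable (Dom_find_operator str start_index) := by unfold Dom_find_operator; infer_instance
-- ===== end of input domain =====

-- B replaces A's four str.find calls + min with one left-to-right scan from the effective start (objective: simpler, one pass).

-- ===== PORT A =====
def find_operator (str : String) (start_index : Int) : Int :=
  let operators : List String := ["+", "-", "*", "/"]
  let index_list : List Int :=
    operators.foldl (fun index_list operator =>
      let index := PySem.Str.findFrom str operator start_index
      if index ≠ -1 then index_list ++ [index] else index_list) []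
  if index_list = [] then -1
  else
    match PySem.List.min? index_list id with
    | some m => m
    | none => -1

-- ===== PORT B =====
-- 'for i in range(k, n): if str[i] in OPERATORS: return i / return -1' as structural
-- recursion over the suffix str[k:] carrying the absolute index i.
def findOpGo : List Char → Nat → Int
  | [], _ => -1
  | c :: rest, i =>
    if c ∈ ['+', '-', '*', '/'] then (i : Int)
    else findOpGo rest (i + 1)

def find_operator_alt (str : String) (start_index : Int) : Int :=
  let n : Int := str.toList.length
  let k : Int :=
    if start_index < 0 then
      (if start_index + n < 0 then 0 else start_index + n)
    else start_index
  findOpGo (str.toList.drop k.toNat) k.toNat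

-- ===== PRECONDITION & SPEC =====
def Spec_find_operator (str : String) (start_index : Int) (out : Int) : Prop := out = find_operator_alt str start_index
instance (str : String) (start_index : Int) (out : Int) : Decidable (Spec_find_operator str start_index out) := by unfold Spec_find_operator; infer_instance

-- ===== CLAIM (what is proved, stated in full; the proofs are below) =====
def Claim_equal_find_operator : Prop := ∀ (str : String) (start_index : Int), Dom_find_operator str start_index → Spec_find_operator str start_index (find_operator str start_index)

-- ===== LEMMAS AND PROOFS =====

theorem singleton_infix_iff_mem {c : Char} {l : List Char} : [c] <:+: l ↔ c ∈ l := by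
  constructor
  · intro h; exact h.subset (List.mem_singleton_self c)
  · intro h
    rcases List.mem_iff_append.mp h with ⟨s, t, rfl⟩
    exact ⟨s, t, by simp⟩

theorem find_singleton_nil (c : Char) : PySem.Chars.find [] [c] = -1 := by
  rw [PySem.Chars.find_eq_neg_one_iff]
  rw [singleton_infix_iff_mem]
  simp

-- str.find for a one-character needle, computed on the head of the haystack
theorem find_singleton_cons (x : Char) (cs : List Char) (c : Char) :
    PySem.Chars.find (x :: cs) [c] =
      if x = c then 0
      else if PySem.Chars.find cs [c] = -1 then -1
      else 1 + PySem.Chars.find cs [c] := by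
  by_cases hx : x = c
  · subst hx
    rw [if_pos rfl]
    have hne : PySem.Chars.find (x :: cs) [x] ≠ -1 := by
      rw [PySem.Chars.find_ne_neg_one_iff, singleton_infix_iff_mem]
      exact List.mem_cons_self
    have hge : 0 ≤ PySem.Chars.find (x :: cs) [x] := by
      have := PySem.Chars.neg_one_le_find (x :: cs) [x]; omega
    obtain ⟨hpre, hmin⟩ := PySem.Chars.find_spec hge
    have hnp : ¬ 0 < (PySem.Chars.find (x :: cs) [x]).toNat :=
      fun hpos => hmin 0 hpos (by simp)
    omega
  · rw [if_neg hx]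
    by_cases h1 : PySem.Chars.find cs [c] = -1
    · rw [if_pos h1]
      rw [PySem.Chars.find_eq_neg_one_iff] at h1 ⊢
      rw [singleton_infix_iff_mem] at h1 ⊢
      simp [h1]
      intro h; exact hx h.symm
    · rw [if_neg h1]
      have hr : 0 ≤ PySem.Chars.find cs [c] := by
        have := PySem.Chars.neg_one_le_find cs [c]; omega
      obtain ⟨rpre, rmin⟩ := PySem.Chars.find_spec hr
      have hmem : c ∈ cs := by
        rw [← singleton_infix_iff_mem, ← PySem.Chars.find_ne_neg_one_iff]; exact h1
      have hF : 0 ≤ PySem.Chars.find (x :: cs) [c] := by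
        have hne : PySem.Chars.find (x :: cs) [c] ≠ -1 := by
          rw [PySem.Chars.find_ne_neg_one_iff, singleton_infix_iff_mem]
          exact List.mem_cons_of_mem _ hmem
        have := PySem.Chars.neg_one_le_find (x :: cs) [c]; omega
      obtain ⟨Fpre, Fmin⟩ := PySem.Chars.find_spec hF
      set F := PySem.Chars.find (x :: cs) [c] with hFdef
      set r := PySem.Chars.find cs [c] with hrdef
      have hFne0 : F.toNat ≠ 0 := by
        intro h0
        rw [h0] at Fpre
        simp only [List.drop_zero] at Fpre
        rcases Fpre with ⟨t, ht⟩
        simp at ht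
        exact hx ht.1.symm
      have hocc : [c] <+: cs.drop (F.toNat - 1) := by
        have : (x :: cs).drop F.toNat = cs.drop (F.toNat - 1) := by
          obtain ⟨m, hm⟩ : ∃ m, F.toNat = m + 1 := ⟨F.toNat - 1, by omega⟩
          rw [hm]; simp
        rwa [this] at Fpre
      have h2 : r.toNat ≤ F.toNat - 1 := by
        by_contra hlt
        exact rmin _ (by omega) hocc
      have h3 : F.toNat ≤ r.toNat + 1 := by
        by_contra hlt
        have : [c] <+: (x :: cs).drop (r.toNat + 1) := by simpa using rpre
        exact Fmin (r.toNat + 1) (by omega) this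
      omega

-- the effective start index Python's str.find uses (negative counts from the end, clamped below at 0)
def effStart (n : Int) (start : Int) : Int :=
  if start < 0 then (if start + n < 0 then 0 else start + n) else start

theorem effStart_nonneg (n : Int) (start : Int) : 0 ≤ n → 0 ≤ effStart n start := by
  intro hn; unfold effStart; split_ifs <;> omega

theorem findFrom_singleton (s : List Char) (c : Char) (start : Int) :
    PySem.Chars.findFrom s [c] start none =
      (if PySem.Chars.find (s.drop (effStart s.length start).toNat) [c] = -1 then -1
       else effStart s.length start + PySem.Chars.find (s.drop (effStart s.length start).toNat) [c]) := by
  unfold PySem.Chars.findFrom effStart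
  by_cases hlt : (s.length : Int) < (if start < 0 then (if start + s.length < 0 then 0 else start + s.length) else start)
  · have hge : (0:Int) ≤ (if start < 0 then (if start + s.length < 0 then 0 else start + s.length) else start) := by
      split_ifs <;> omega
    have hdrop : s.drop (if start < 0 then (if start + s.length < 0 then 0 else start + s.length) else start).toNat = ([] : List Char) := by
      apply List.drop_eq_nil_of_le
      omega
    rw [if_pos (by split_ifs at hlt ⊢ <;> omega)]
    rw [hdrop, find_singleton_nil]
    simp
  · have htake : List.take ((s.length : Int)).toNat s = s := by simp
    rw [if_neg hlt, htake]

-- A's index_list, rewritten through findFrom_singleton: a function of the dropped suffix and the base index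
def abuild (cs : List Char) (b : Int) : List Int :=
  ['+', '-', '*', '/'].foldl (fun acc c =>
    let idx := if PySem.Chars.find cs [c] = -1 then -1 else b + PySem.Chars.find cs [c]
    if idx ≠ -1 then acc ++ [idx] else acc) []

def aval (cs : List Char) (b : Int) : Int :=
  if abuild cs b = [] then -1
  else
    match PySem.List.min? (abuild cs b) id with
    | some m => m
    | none => -1

theorem abuild_eq (cs : List Char) (b : Int) (hb : 0 ≤ b) :
    abuild cs b =
      (['+', '-', '*', '/'].filter (fun c => PySem.Chars.find cs [c] ≠ -1)).map
        (fun c => b + PySem.Chars.find cs [c]) := by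
  unfold abuild
  have aux : ∀ (ops : List Char) (acc : List Int),
      ops.foldl (fun acc c =>
        let idx := if PySem.Chars.find cs [c] = -1 then -1 else b + PySem.Chars.find cs [c]
        if idx ≠ -1 then acc ++ [idx] else acc) acc =
      acc ++ (ops.filter (fun c => PySem.Chars.find cs [c] ≠ -1)).map
        (fun c => b + PySem.Chars.find cs [c]) := by
    intro ops
    induction ops with
    | nil => intro acc; simp
    | cons c t ih =>
      intro acc
      by_cases hc : PySem.Chars.find cs [c] = -1
      · simp only [List.foldl_cons, hc, ne_eq, not_true_eq_false, reduceIte, List.filter_cons]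
        rw [ih]
        simp
      · have hge : 0 ≤ PySem.Chars.find cs [c] := by
          have := PySem.Chars.neg_one_le_find cs [c]; omega
        have hne : b + PySem.Chars.find cs [c] ≠ -1 := by omega
        simp only [List.foldl_cons, if_neg hc, ne_eq, hne, not_false_eq_true, reduceIte, List.filter_cons]
        rw [ih]
        simp [hc, List.append_assoc]
  exact (aux _ []).trans (by simp)

def minGo (m : Int) (l : List Int) : Int := l.foldl (fun m x => if x < m then x else m) m

theorem min?_cons_minGo (t : List Int) : ∀ (x : Int), PySem.List.min? (x :: t) (id : Int → Int) = some (minGo x t) := by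
  induction t with
  | nil => intro x; rfl
  | cons y t ih =>
    intro x
    have h1 : PySem.List.min? (x :: y :: t) (id : Int → Int)
        = PySem.List.min? ((if y < x then y else x) :: t) (id : Int → Int) := by
      unfold PySem.List.min?
      simp only [List.foldl_cons, id]
      congr 1
      split_ifs <;> rfl
    rw [h1, ih]
    have h2 : minGo x (y :: t) = minGo (if y < x then y else x) t := rfl
    rw [h2]

theorem minGo_of_le (l : List Int) : ∀ (m : Int), (∀ y ∈ l, m ≤ y) → minGo m l = m := by
  induction l with
  | nil => intro m _; rfl
  | cons y t ih =>
    intro m h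
    have hy : m ≤ y := h y (by simp)
    have hstep : minGo m (y :: t) = minGo m t := by
      unfold minGo; simp only [List.foldl_cons, if_neg (by omega : ¬ y < m)]
    rw [hstep]
    exact ih m (fun z hz => h z (by simp [hz]))

theorem minGo_eq_of_mem (l : List Int) : ∀ (m b : Int), b ∈ l → (∀ y ∈ l, b ≤ y) → b ≤ m →
    minGo m l = b := by
  induction l with
  | nil => intro m b h; simp at h
  | cons y t ih =>
    intro m b hmem hle hm
    have hy : b ≤ y := hle y (by simp)
    have hstep : minGo m (y :: t) = minGo (if y < m then y else m) t := rfl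
    rw [hstep]
    by_cases hbt : b ∈ t
    · exact ih _ b hbt (fun z hz => hle z (by simp [hz])) (by split_ifs <;> omega)
    · have hyb : y = b := by
        rcases List.mem_cons.mp hmem with h | h
        · exact h.symm
        · exact absurd h hbt
      subst hyb
      have h4 : (if y < m then y else m) = y := by split_ifs <;> omega
      rw [h4]
      exact minGo_of_le t y (fun z hz => hle z (by simp [hz]))

theorem min?_eq_of_mem_of_le (l : List Int) (b : Int) (hmem : b ∈ l) (hle : ∀ y ∈ l, b ≤ y) :
    PySem.List.min? l id = some b := by
  rcases l with _ | ⟨y, t⟩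
  · simp at hmem
  · rw [min?_cons_minGo]
    by_cases hbt : b ∈ t
    · rw [minGo_eq_of_mem t y b hbt (fun z hz => hle z (by simp [hz])) (hle y (by simp))]
    · have hyb : y = b := by
        rcases List.mem_cons.mp hmem with h | h
        · exact h.symm
        · exact absurd h hbt
      subst hyb
      rw [minGo_of_le t y (fun z hz => hle z (by simp [hz]))]

theorem aval_eq_scan (cs : List Char) : ∀ b : Int, 0 ≤ b → aval cs b = findOpGo cs b.toNat := by
  induction cs with
  | nil =>
    intro b hb
    simp [aval, abuild, findOpGo, find_singleton_nil]
  | cons x cs ih =>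
    intro b hb
    by_cases hop : x ∈ ['+', '-', '*', '/']
    · -- head is an operator: both sides give b
      have hgo : findOpGo (x :: cs) b.toNat = (b.toNat : Int) := by
        simp [findOpGo, hop]
      rw [hgo, Int.toNat_of_nonneg hb]
      have hx0 : PySem.Chars.find (x :: cs) [x] = 0 := by
        rw [find_singleton_cons, if_pos rfl]
      have hL := abuild_eq (x :: cs) b hb
      have hmem : b ∈ abuild (x :: cs) b := by
        rw [hL]
        refine List.mem_map.mpr ⟨x, List.mem_filter.mpr ⟨hop, by simp [hx0]⟩, by simp [hx0]⟩
      have hle : ∀ y ∈ abuild (x :: cs) b, b ≤ y := by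
        intro y hy
        rw [hL] at hy
        rcases List.mem_map.mp hy with ⟨c, hc, rfl⟩
        have hcne : PySem.Chars.find (x :: cs) [c] ≠ -1 := by
          have := (List.mem_filter.mp hc).2
          simpa using this
        have := PySem.Chars.neg_one_le_find (x :: cs) [c]
        omega
      unfold aval
      rw [if_neg (by intro h; rw [h] at hmem; simp at hmem)]
      rw [min?_eq_of_mem_of_le _ b hmem hle]
    · -- head not an operator: the whole list shifts by one
      have hx1 : x ≠ '+' := by intro h; exact hop (by simp [h])
      have hx2 : x ≠ '-' := by intro h; exact hop (by simp [h])
      have hx3 : x ≠ '*' := by intro h; exact hop (by simp [h])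
      have hx4 : x ≠ '/' := by intro h; exact hop (by simp [h])
      have hgo : findOpGo (x :: cs) b.toNat = findOpGo cs (b + 1).toNat := by
        have h5 : (b + 1).toNat = b.toNat + 1 := by omega
        simp [findOpGo, hop, h5]
      have hcons : ∀ c ∈ (['+', '-', '*', '/'] : List Char),
          PySem.Chars.find (x :: cs) [c] =
            (if PySem.Chars.find cs [c] = -1 then -1 else 1 + PySem.Chars.find cs [c]) := by
        intro c hc
        rw [find_singleton_cons, if_neg ?_]
        fin_cases hc
        · exact hx1
        · exact hx2
        · exact hx3
        · exact hx4
      have habuild : abuild (x :: cs) b = abuild cs (b + 1) := by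
        rw [abuild_eq _ _ hb, abuild_eq _ _ (by omega : (0:Int) ≤ b + 1)]
        rw [List.filter_congr (l := ['+', '-', '*', '/'])
          (q := fun c => PySem.Chars.find cs [c] ≠ -1) ?_]
        · apply List.map_congr_left
          intro c hc
          have hcm := List.mem_filter.mp hc
          have hne : PySem.Chars.find cs [c] ≠ -1 := by simpa using hcm.2
          rw [hcons c hcm.1, if_neg hne]
          omega
        · intro c hc
          rw [hcons c hc]
          by_cases hn : PySem.Chars.find cs [c] = -1
          · simp [hn]
          · have := PySem.Chars.neg_one_le_find cs [c]
            simp only [hn]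
            have h6 : (1 + PySem.Chars.find cs [c]) ≠ -1 := by omega
            simp [h6, hn]
      unfold aval
      rw [habuild]
      rw [hgo, ← ih (b + 1) (by omega)]
      rfl

theorem find_operator_eq_aval (str : String) (start_index : Int) :
    find_operator str start_index =
      aval (str.toList.drop (effStart str.toList.length start_index).toNat)
           (effStart str.toList.length start_index) := by
  have hp : ("+" : String).toList = ['+'] := rfl
  have hm : ("-" : String).toList = ['-'] := rfl
  have hs : ("*" : String).toList = ['*'] := rfl
  have hd : ("/" : String).toList = ['/'] := rfl
  simp only [find_operator, aval, abuild, PySem.Str.findFrom_eq, hp, hm, hs, hd,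
    List.foldl_cons, List.foldl_nil, findFrom_singleton]

-- ===== VERDICT (by name: the statement is the Claim_ definition above) =====
theorem find_operator_spec : Claim_equal_find_operator := by
  intro str start_index _
  unfold Spec_find_operator find_operator_alt
  rw [find_operator_eq_aval]
  have h0 : (0:Int) ≤ effStart str.toList.length start_index :=
    effStart_nonneg _ _ (by positivity)
  rw [aval_eq_scan _ _ h0]
  simp [effStart]
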